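-- pv_equiv track=rewrite | github.com/alok/ACL2Lean | scripts/acl2_hint_bridge.py | collect_checkpoint_blocks
-- ===== SOURCE A (Python) =====
-- def collect_checkpoint_blocks(lines: list[str]) -> list[dict[str, str]]:
--     blocks: list[dict[str, str]] = []
--     i = 0
--     while i < len(lines):
--         if "A key checkpoint:" in lines[i]:
--             start = i + 1
--             j = start
--             while j < len(lines) and lines[j].strip() != "])":
--                 j += 1
--             body = "\n".join(line.rstrip() for line in lines[start:j]).strip()
--             if body:
--                 first = body.splitlines()[0].strip()
--                 blocks.append({"kind": "key-checkpoint", "label": first, "text": body})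
--             i = j
--         i += 1
--     return blocks
-- ===== SOURCE B (Python) =====
-- def collect_checkpoint_blocks(lines: list[str]) -> list[dict[str, str]]:
--     # Staged splitting: a generic split_at helper cuts the list at the first
--     # line matching a predicate; the loop repeatedly discards up to the marker,
--     # cuts the remainder at the closing "])", and keeps the piece in between.
--     def split_at(pred, xs):
--         for k, x in enumerate(xs):
--             if pred(x):
--                 return xs[:k], xs[k:]
--         return xs, []
--
--     blocks: list[dict[str, str]] = []
--     rest = lines
--     while rest:
--         _, rest = split_at(lambda l: "A key checkpoint:" in l, rest)
--         if not rest: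
--             break
--         body_lines, tail = split_at(lambda l: l.strip() == "])", rest[1:])
--         body = "\n".join(l.rstrip() for l in body_lines).strip()
--         if body:
--             blocks.append({
--                 "kind": "key-checkpoint",
--                 "label": body.splitlines()[0].strip(),
--                 "text": body,
--             })
--         rest = tail[1:]
--     return blocks
-- ===== Notes on version B (the rewrite author's own statement) =====
-- stated objective: alternative
-- what changed: Replaced A's index arithmetic (outer while over i, inner while advancing j, then re-slicing lines[start:j]) by staged list splitting: a generic split_at(pred, xs) helper cuts the list at the first matching line, and the loop alternates 'cut at marker' / 'cut at closing' on the shrinking remainder, so no indices or slices into the original list appear.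
import Mathlib
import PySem

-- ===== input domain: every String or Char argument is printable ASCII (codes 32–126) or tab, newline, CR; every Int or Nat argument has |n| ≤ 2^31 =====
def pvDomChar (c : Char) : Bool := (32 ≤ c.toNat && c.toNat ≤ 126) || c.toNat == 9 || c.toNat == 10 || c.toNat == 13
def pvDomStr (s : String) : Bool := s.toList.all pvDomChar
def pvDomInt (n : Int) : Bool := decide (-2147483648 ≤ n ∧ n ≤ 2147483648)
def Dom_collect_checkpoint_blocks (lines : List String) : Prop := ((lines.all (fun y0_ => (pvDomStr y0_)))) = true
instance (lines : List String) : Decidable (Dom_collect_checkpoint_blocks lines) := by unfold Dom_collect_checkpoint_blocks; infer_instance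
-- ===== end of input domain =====

-- B replaces A's index arithmetic by staged list splitting via a generic split_at helper; objective: alternative.

-- ===== PORT A =====
-- inner while: advance j until out of range or lines[j].strip() == "])"
def cbA_scan (lines : List String) (j : Nat) : Nat :=
  if h : j < lines.length then
    if PySem.Str.strip (lines[j]) ≠ "])" then cbA_scan lines (j + 1) else j
  else j
termination_by lines.length - j
decreasing_by exact Nat.sub_lt_sub_left h (Nat.lt_succ_self j)

-- the outer loop needs j ≥ start for termination
theorem cbA_scan_ge (lines : List String) (j : Nat) : j ≤ cbA_scan lines j := by
  unfold cbA_scan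
  split
  · split
    · exact le_trans (Nat.le_succ j) (cbA_scan_ge lines (j + 1))
    · exact le_refl j
  · exact le_refl j
termination_by lines.length - j

-- outer while over index i; body built from the slice lines[start:j]
-- (body.splitlines()[0] is ported as headD "": under the guard body ≠ "" the list is nonempty)
def cbA_outer (lines : List String) (i : Nat) : List (List (String × String)) :=
  if h : i < lines.length then
    if PySem.Str.isIn "A key checkpoint:" (lines[i]) then
      let start := i + 1
      let j := cbA_scan lines start
      let body := PySem.Str.strip (PySem.Str.join "\n"
        ((PySem.List.slice lines (some (start : Int)) (some (j : Int))).map PySem.Str.rstrip))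
      if body ≠ "" then
        [("kind", "key-checkpoint"),
         ("label", PySem.Str.strip ((PySem.Str.splitlines body).headD "")),
         ("text", body)] :: cbA_outer lines (j + 1)
      else cbA_outer lines (j + 1)
    else cbA_outer lines (i + 1)
  else []
termination_by lines.length - i
decreasing_by
  · exact Nat.sub_lt_sub_left h (Nat.lt_succ_of_le (Nat.le_of_succ_le (cbA_scan_ge lines (i + 1))))
  · exact Nat.sub_lt_sub_left h (Nat.lt_succ_of_le (Nat.le_of_succ_le (cbA_scan_ge lines (i + 1))))
  · exact Nat.sub_lt_sub_left h (Nat.lt_succ_self i)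

def collect_checkpoint_blocks (lines : List String) : List (List (String × String)) :=
  cbA_outer lines 0

-- ===== PORT B =====
-- split_at(pred, xs): (xs[:k], xs[k:]) at the first k with pred, else (xs, [])
def cbSplitAt (p : String → Bool) : List String → List String × List String
  | [] => ([], [])
  | l :: t =>
    if p l then ([], l :: t)
    else
      let q := cbSplitAt p t
      (l :: q.1, q.2)

theorem cbSplitAt_snd_len (p : String → Bool) (xs : List String) :
    (cbSplitAt p xs).2.length ≤ xs.length := by
  induction xs with
  | nil => simp [cbSplitAt]
  | cons l t ih =>
    simp only [cbSplitAt]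
    split
    · simp
    · simpa using Nat.le_succ_of_le ih

-- body = "\n".join(l.rstrip() for l in body_lines).strip()
def cbBody (body_lines : List String) : String :=
  PySem.Str.strip (PySem.Str.join "\n" (body_lines.map PySem.Str.rstrip))

-- the `if body:` append of one block
def cbBlock (body : String) : List (List (String × String)) :=
  if body ≠ "" then
    [[("kind", "key-checkpoint"),
      ("label", PySem.Str.strip ((PySem.Str.splitlines body).headD "")),
      ("text", body)]]
  else []

-- the while loop over the shrinking remainder `rest` (rest starts as the whole list;
-- each round splits off everything up to the marker, then cuts at the closing line)
def collect_checkpoint_blocks_alt (rest0 : List String) : List (List (String × String)) :=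
  if hne : (cbSplitAt (fun l => PySem.Str.isIn "A key checkpoint:" l) rest0).2 = [] then []
  else
    cbBlock (cbBody (cbSplitAt (fun l => PySem.Str.strip l == "])")
        ((cbSplitAt (fun l => PySem.Str.isIn "A key checkpoint:" l) rest0).2.tail)).1) ++
    collect_checkpoint_blocks_alt
      ((cbSplitAt (fun l => PySem.Str.strip l == "])")
          ((cbSplitAt (fun l => PySem.Str.isIn "A key checkpoint:" l) rest0).2.tail)).2.drop 1)
termination_by rest0.length
decreasing_by
  exact Nat.lt_of_le_of_lt
    (Nat.le_trans (List.length_drop.le.trans (Nat.sub_le _ _))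
      (Nat.le_trans (cbSplitAt_snd_len _ _) List.length_tail.le))
    (Nat.lt_of_lt_of_le (Nat.sub_lt (List.length_pos_of_ne_nil hne) Nat.one_pos)
      (cbSplitAt_snd_len _ rest0))

-- ===== PRECONDITION & SPEC =====
def Spec_collect_checkpoint_blocks (lines : List String) (out : List (List (String × String))) : Prop := out = collect_checkpoint_blocks_alt lines
instance (lines : List String) (out : List (List (String × String))) : Decidable (Spec_collect_checkpoint_blocks lines out) := by unfold Spec_collect_checkpoint_blocks; infer_instance

-- ===== CLAIM (what is proved, stated in full; the proofs are below) =====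
def Claim_equal_collect_checkpoint_blocks : Prop := ∀ (lines : List String), Dom_collect_checkpoint_blocks lines → Spec_collect_checkpoint_blocks lines (collect_checkpoint_blocks lines)

-- ===== LEMMAS AND PROOFS =====

-- B's result depends only on the remainder after the marker split
theorem cbAlt_congr (xs ys : List String)
    (h : (cbSplitAt (fun l => PySem.Str.isIn "A key checkpoint:" l) xs).2 =
         (cbSplitAt (fun l => PySem.Str.isIn "A key checkpoint:" l) ys).2) :
    collect_checkpoint_blocks_alt xs = collect_checkpoint_blocks_alt ys := by
  conv_lhs => rw [collect_checkpoint_blocks_alt]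
  conv_rhs => rw [collect_checkpoint_blocks_alt]
  simp only [h]

-- the closing-line split equals A's index scan: prefix = the slice, suffix from the closer
theorem cbSplit_close_eq (lines : List String) (s : Nat) :
    cbSplitAt (fun l => PySem.Str.strip l == "])") (lines.drop s) =
      ((lines.drop s).take (cbA_scan lines s - s), lines.drop (cbA_scan lines s)) := by
  by_cases h : s < lines.length
  · have hdrop : lines.drop s = lines[s] :: lines.drop (s + 1) :=
      List.drop_eq_getElem_cons h
    rw [hdrop]
    by_cases hstrip : PySem.Str.strip (lines[s]) = "])"
    · have hscan : cbA_scan lines s = s := by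
        unfold cbA_scan; rw [dif_pos h, if_neg (by simp [hstrip])]
      rw [hscan]
      simp only [cbSplitAt]
      rw [if_pos (by simp [hstrip])]
      rw [Nat.sub_self, List.take_zero, hdrop]
    · have hscan : cbA_scan lines s = cbA_scan lines (s + 1) := by
        conv_lhs => rw [cbA_scan]
        rw [dif_pos h, if_pos hstrip]
      have ih := cbSplit_close_eq lines (s + 1)
      have hge := cbA_scan_ge lines (s + 1)
      simp only [cbSplitAt]
      rw [if_neg (by simp [hstrip])]
      rw [ih, hscan]
      have htake : (lines[s] :: lines.drop (s + 1)).take (cbA_scan lines (s + 1) - s) =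
          lines[s] :: (lines.drop (s + 1)).take (cbA_scan lines (s + 1) - (s + 1)) := by
        have : cbA_scan lines (s + 1) - s = ((cbA_scan lines (s + 1) - (s + 1))) + 1 := by omega
        rw [this, List.take_succ_cons]
      rw [htake]
  · have hdrop : lines.drop s = [] := List.drop_eq_nil_of_le (by omega)
    have hscan : cbA_scan lines s = s := by
      unfold cbA_scan; rw [dif_neg h]
    rw [hdrop, hscan]
    simp [cbSplitAt, hdrop]
termination_by lines.length - s

-- main invariant: A's outer loop at index i equals B's loop on the suffix
theorem cb_main (lines : List String) (i : Nat) :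
    cbA_outer lines i = collect_checkpoint_blocks_alt (lines.drop i) := by
  by_cases h : i < lines.length
  · have hdrop : lines.drop i = lines[i] :: lines.drop (i + 1) :=
      List.drop_eq_getElem_cons h
    unfold cbA_outer
    simp only [dif_pos h]
    by_cases hm : PySem.Str.isIn "A key checkpoint:" (lines[i]) = true
    · rw [if_pos hm]
      rw [hdrop, collect_checkpoint_blocks_alt]
      have hsplit1 : cbSplitAt (fun l => PySem.Str.isIn "A key checkpoint:" l)
          (lines[i] :: lines.drop (i + 1)) = ([], lines[i] :: lines.drop (i + 1)) := by
        simp only [cbSplitAt]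
        rw [if_pos hm]
      have hclose := cbSplit_close_eq lines (i + 1)
      have hge := cbA_scan_ge lines (i + 1)
      have hslice : PySem.List.slice lines (some ((i + 1 : Nat) : Int)) (some ((cbA_scan lines (i + 1) : Nat) : Int)) =
          (lines.drop (i + 1)).take (cbA_scan lines (i + 1) - (i + 1)) :=
        PySem.List.slice_natCast lines (i + 1) (cbA_scan lines (i + 1))
      have ihm := cb_main lines (cbA_scan lines (i + 1) + 1)
      have hdd : (lines.drop (cbA_scan lines (i + 1))).drop 1 = lines.drop (cbA_scan lines (i + 1) + 1) := by
        rw [List.drop_drop]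
      simp only [hsplit1, List.tail_cons, hclose, hslice, hdd, cbBlock, cbBody]
      rw [dif_neg (List.cons_ne_nil _ _)]
      split <;> simp [ihm]
    · rw [if_neg hm]
      have ih := cb_main lines (i + 1)
      rw [ih]
      apply cbAlt_congr
      rw [hdrop]
      simp only [cbSplitAt]
      rw [if_neg hm]
  · have hdrop : lines.drop i = [] := List.drop_eq_nil_of_le (by omega)
    unfold cbA_outer
    rw [dif_neg h, hdrop]
    rw [collect_checkpoint_blocks_alt]
    simp [cbSplitAt]
termination_by lines.length - i
decreasing_by
  · have := cbA_scan_ge lines (i + 1); omega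
  · omega

-- ===== VERDICT (by name: the statement is the Claim_ definition above) =====
theorem collect_checkpoint_blocks_spec : Claim_equal_collect_checkpoint_blocks := by
  intro lines _
  unfold Spec_collect_checkpoint_blocks collect_checkpoint_blocks
  simpa using cb_main lines 0
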